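-- pv_equiv track=rewrite | github.com/guyleafcloud/fantasy-cricket-leafcloud | backend/kncb_final_solution.py | _determine_tier
-- ===== SOURCE A (Python) =====
-- def _determine_tier(grade_name: str) -> str:
--     """Determine tier from grade name"""
--     if not grade_name:
--         return 'tier3'
--
--     name_lower = grade_name.lower()
--
--     if 'topklasse' in name_lower or 'hoofdklasse' in name_lower:
--         return 'tier1'
--     elif 'eerste' in name_lower or 'tweede' in name_lower:
--         return 'tier2'
--     elif 'derde' in name_lower or 'vierde' in name_lower:
--         return 'tier3'
--     elif 'zami' in name_lower or 'zomi' in name_lower: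
--         return 'social'
--     elif any(x in name_lower for x in ['u17', 'u15', 'u13', 'u11', 'jeugd']):
--         return 'youth'
--     elif 'vrouwen' in name_lower or 'dames' in name_lower:
--         return 'ladies'
--     else:
--         return 'tier3'
-- ===== SOURCE B (Python) =====
-- _KEYWORD_RANK = {
--     'topklasse': 0, 'hoofdklasse': 0,
--     'eerste': 1, 'tweede': 1,
--     'derde': 2, 'vierde': 2,
--     'zami': 3, 'zomi': 3,
--     'u17': 4, 'u15': 4, 'u13': 4, 'u11': 4, 'jeugd': 4,
--     'vrouwen': 5, 'dames': 5,
-- }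
-- _RANK_TIER = ('tier1', 'tier2', 'tier3', 'social', 'youth', 'ladies')
--
--
-- def _determine_tier(grade_name: str) -> str:
--     """Single positional scan: at each index improve the best (lowest) priority
--     rank of any keyword starting there, then map the minimum rank to its tier."""
--     name = grade_name.lower()
--     best = 6
--     for i in range(len(name)):
--         for kw, rank in _KEYWORD_RANK.items():
--             if rank < best and name.startswith(kw, i):
--                 best = rank
--     return _RANK_TIER[best] if best < 6 else 'tier3'
-- ===== Notes on version B (the rewrite author's own statement) =====
-- stated objective: alternative
-- what changed: Instead of A's ordered if/elif chain of substring tests, B does one positional scan of the lowered string, improving at each index the minimum priority rank of any keyword that starts there (startswith), then maps the minimum rank to its tier; priority becomes arithmetic min instead of branch order.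
import Mathlib
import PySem

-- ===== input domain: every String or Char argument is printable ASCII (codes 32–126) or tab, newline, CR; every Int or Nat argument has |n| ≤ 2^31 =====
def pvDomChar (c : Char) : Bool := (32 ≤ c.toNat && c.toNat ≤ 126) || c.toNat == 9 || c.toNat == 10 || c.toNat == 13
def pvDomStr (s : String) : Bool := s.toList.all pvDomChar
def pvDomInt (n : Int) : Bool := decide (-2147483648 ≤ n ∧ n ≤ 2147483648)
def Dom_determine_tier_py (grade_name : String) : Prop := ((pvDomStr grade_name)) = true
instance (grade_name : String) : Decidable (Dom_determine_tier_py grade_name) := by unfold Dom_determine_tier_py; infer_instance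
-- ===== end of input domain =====

-- B replaces A's ordered if/elif substring chain by a single positional scan that maintains the minimum keyword-priority rank starting at any index, then maps the rank to a tier; objective: alternative, same cost.


-- ===== PORT A =====
-- Literal transliteration of A's if/elif chain ('not grade_name' = empty string).
def determine_tier_py (grade_name : String) : String :=
  if grade_name.toList = [] then "tier3"
  else
    let name_lower := PySem.Str.lower grade_name
    if PySem.Str.isIn "topklasse" name_lower || PySem.Str.isIn "hoofdklasse" name_lower then "tier1"
    else if PySem.Str.isIn "eerste" name_lower || PySem.Str.isIn "tweede" name_lower then "tier2"
    else if PySem.Str.isIn "derde" name_lower || PySem.Str.isIn "vierde" name_lower then "tier3"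
    else if PySem.Str.isIn "zami" name_lower || PySem.Str.isIn "zomi" name_lower then "social"
    else if ["u17", "u15", "u13", "u11", "jeugd"].any (fun x => PySem.Str.isIn x name_lower) then "youth"
    else if PySem.Str.isIn "vrouwen" name_lower || PySem.Str.isIn "dames" name_lower then "ladies"
    else "tier3"

-- ===== PORT B =====
-- the _KEYWORD_RANK dict of Source B (insertion order) and the _RANK_TIER tuple
def pvKwRanks : List (List Char × Nat) :=
  [ ("topklasse".toList, 0), ("hoofdklasse".toList, 0)
  , ("eerste".toList, 1), ("tweede".toList, 1)
  , ("derde".toList, 2), ("vierde".toList, 2)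
  , ("zami".toList, 3), ("zomi".toList, 3)
  , ("u17".toList, 4), ("u15".toList, 4), ("u13".toList, 4), ("u11".toList, 4), ("jeugd".toList, 4)
  , ("vrouwen".toList, 5), ("dames".toList, 5) ]

def pvRankTier : List String := ["tier1", "tier2", "tier3", "social", "youth", "ladies"]

-- B: one scan over the positions of the lowered name; at each index improve the best
-- (lowest) rank of any keyword starting there ('name.startswith(kw, i)' = kw <+: name.drop i).
def determine_tier_py_alt (grade_name : String) : String :=
  let name := (PySem.Str.lower grade_name).toList
  let best := (List.range name.length).foldl
    (fun best i =>
      pvKwRanks.foldl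
        (fun b p => if p.2 < b ∧ p.1 <+: name.drop i then p.2 else b) best)
    6
  if best < 6 then pvRankTier.getD best "tier3" else "tier3"

-- ===== PRECONDITION & SPEC =====
def Spec_determine_tier_py (grade_name : String) (out : String) : Prop := out = determine_tier_py_alt grade_name
instance (grade_name : String) (out : String) : Decidable (Spec_determine_tier_py grade_name out) := by unfold Spec_determine_tier_py; infer_instance

-- ===== CLAIM (what is proved, stated in full; the proofs are below) =====
def Claim_equal_determine_tier_py : Prop := ∀ (grade_name : String), Dom_determine_tier_py grade_name → Spec_determine_tier_py grade_name (determine_tier_py grade_name)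

-- ===== LEMMAS AND PROOFS =====

-- the position × keyword pairs B's two nested loops range over, flattened
def pvL (name : List Char) : List (Nat × (List Char × Nat)) :=
  (List.range name.length).flatMap (fun i => pvKwRanks.map (fun p => (i, p)))

def pvStep (name : List Char) (b : Nat) (q : Nat × (List Char × Nat)) : Nat :=
  if q.2.2 < b ∧ q.2.1 <+: name.drop q.1 then q.2.2 else b

lemma pv_foldl_flatMap {α β γ : Type} (g : β → List α) (f : γ → α → γ)
    (l : List β) (init : γ) :
    (l.flatMap g).foldl f init = l.foldl (fun b x => (g x).foldl f b) init := by
  induction l generalizing init with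
  | nil => rfl
  | cons x xs ih => simp [List.flatMap_cons, List.foldl_append, ih]

lemma pv_nested_eq (name : List Char) :
    (List.range name.length).foldl
      (fun best i =>
        pvKwRanks.foldl
          (fun b p => if p.2 < b ∧ p.1 <+: name.drop i then p.2 else b) best) 6
    = (pvL name).foldl (pvStep name) 6 := by
  unfold pvL
  rw [pv_foldl_flatMap]
  simp [List.foldl_map, pvStep]

lemma pvStep_le (name : List Char) (b : Nat) (q : Nat × (List Char × Nat)) :
    pvStep name b q ≤ b := by
  unfold pvStep
  split_ifs with h
  · omega
  · exact le_refl b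

lemma pvStep_le_val (name : List Char) (b : Nat) (q : Nat × (List Char × Nat))
    (h : q.2.1 <+: name.drop q.1) : pvStep name b q ≤ q.2.2 := by
  unfold pvStep
  split_ifs with hc
  · exact le_refl _
  · rw [not_and] at hc
    have := hc
    by_contra hb
    exact (hc (by omega)) h

lemma pv_fold_le (name : List Char) :
    ∀ (L : List (Nat × (List Char × Nat))) (b : Nat), L.foldl (pvStep name) b ≤ b := by
  intro L
  induction L with
  | nil => intro b; simp
  | cons q L ih =>
    intro b
    simp only [List.foldl_cons]
    exact le_trans (ih _) (pvStep_le name b q)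

lemma pv_fold_lb (name : List Char) :
    ∀ (L : List (Nat × (List Char × Nat))) (b : Nat) (q : Nat × (List Char × Nat)),
      q ∈ L → q.2.1 <+: name.drop q.1 → L.foldl (pvStep name) b ≤ q.2.2 := by
  intro L
  induction L with
  | nil => intro b q hq; cases hq
  | cons x L ih =>
    intro b q hq hpre
    simp only [List.foldl_cons]
    rcases List.mem_cons.mp hq with h | h
    · subst h
      exact le_trans (pv_fold_le name L _) (pvStep_le_val name b q hpre)
    · exact ih _ q h hpre

lemma pv_fold_attain (name : List Char) :
    ∀ (L : List (Nat × (List Char × Nat))) (b : Nat),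
      L.foldl (pvStep name) b = b ∨
      ∃ q ∈ L, (q.2.1 <+: name.drop q.1) ∧ L.foldl (pvStep name) b = q.2.2 := by
  intro L
  induction L with
  | nil => intro b; left; rfl
  | cons x L ih =>
    intro b
    simp only [List.foldl_cons]
    rcases ih (pvStep name b x) with h | ⟨q, hq, hpre, hval⟩
    · rw [h]
      unfold pvStep
      split_ifs with hc
      · exact Or.inr ⟨x, List.mem_cons_self, hc.2, rfl⟩
      · exact Or.inl rfl
    · exact Or.inr ⟨q, List.mem_cons_of_mem _ hq, hpre, hval⟩

-- if kw (nonempty) occurs in name, the flat scan's result is ≤ kw's rank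
lemma pv_le_of_isIn (name kw : List Char) (r : Nat)
    (hmem : (kw, r) ∈ pvKwRanks) (hkw : kw ≠ [])
    (h : PySem.Chars.isIn kw name = true) :
    (pvL name).foldl (pvStep name) 6 ≤ r := by
  obtain ⟨j, hj⟩ := (PySem.Chars.exists_prefix_drop_iff_isIn kw name).mpr h
  have hjlt : j < name.length := by
    by_contra hge
    rw [List.drop_eq_nil_of_le (by omega)] at hj
    exact hkw (List.prefix_nil.mp hj)
  have hmemL : ((j, (kw, r)) : Nat × (List Char × Nat)) ∈ pvL name := by
    unfold pvL
    simp only [List.mem_flatMap, List.mem_range, List.mem_map]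
    exact ⟨j, hjlt, (kw, r), hmem, rfl⟩
  exact pv_fold_lb name (pvL name) 6 (j, (kw, r)) hmemL hj

-- the flat scan's result is 6, or the rank of some keyword group with a member occurring in name
lemma pv_attain_flags (name : List Char) :
    (pvL name).foldl (pvStep name) 6 = 6 ∨
    ∃ r', (pvL name).foldl (pvStep name) 6 = r' ∧
      ((r' = 0 ∧ (PySem.Chars.isIn "topklasse".toList name = true ∨ PySem.Chars.isIn "hoofdklasse".toList name = true))
      ∨ (r' = 1 ∧ (PySem.Chars.isIn "eerste".toList name = true ∨ PySem.Chars.isIn "tweede".toList name = true))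
      ∨ (r' = 2 ∧ (PySem.Chars.isIn "derde".toList name = true ∨ PySem.Chars.isIn "vierde".toList name = true))
      ∨ (r' = 3 ∧ (PySem.Chars.isIn "zami".toList name = true ∨ PySem.Chars.isIn "zomi".toList name = true))
      ∨ (r' = 4 ∧ (PySem.Chars.isIn "u17".toList name = true ∨ PySem.Chars.isIn "u15".toList name = true
          ∨ PySem.Chars.isIn "u13".toList name = true ∨ PySem.Chars.isIn "u11".toList name = true
          ∨ PySem.Chars.isIn "jeugd".toList name = true))
      ∨ (r' = 5 ∧ (PySem.Chars.isIn "vrouwen".toList name = true ∨ PySem.Chars.isIn "dames".toList name = true))) := by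
  rcases pv_fold_attain name (pvL name) 6 with h | ⟨q, hq, hpre, hval⟩
  · exact Or.inl h
  · right
    unfold pvL at hq
    simp only [List.mem_flatMap, List.mem_range, List.mem_map] at hq
    obtain ⟨i, _, p, hp, hqp⟩ := hq
    subst hqp
    have hin : PySem.Chars.isIn p.1 name = true :=
      (PySem.Chars.exists_prefix_drop_iff_isIn p.1 name).mp ⟨i, hpre⟩
    refine ⟨p.2, hval, ?_⟩
    simp only [pvKwRanks, List.mem_cons, List.not_mem_nil, or_false] at hp
    rcases hp with h|h|h|h|h|h|h|h|h|h|h|h|h|h|h <;> subst h <;> simp at hin <;> simp [hin]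

-- ===== VERDICT (by name: the statement is the Claim_ definition above) =====
set_option maxHeartbeats 1000000 in
theorem determine_tier_py_spec : Claim_equal_determine_tier_py := by
  intro g _
  unfold Spec_determine_tier_py determine_tier_py determine_tier_py_alt
  simp only [pv_nested_eq, PySem.Str.isIn_eq]
  by_cases hg : g.toList = []
  · have hn : (PySem.Str.lower g).toList = ([] : List Char) := by
      rw [PySem.Str.toList_lower, hg]; rfl
    rw [if_pos hg, hn]
    rfl
  · rw [if_neg hg]
    set name := (PySem.Str.lower g).toList with hname
    set r := (pvL name).foldl (pvStep name) 6 with hr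
    have hattain := pv_attain_flags name
    rw [← hr] at hattain
    by_cases h1 : (PySem.Chars.isIn "topklasse".toList name || PySem.Chars.isIn "hoofdklasse".toList name) = true
    · have hle : r ≤ 0 := by
        rcases Bool.or_eq_true_iff.mp h1 with h | h
        · exact pv_le_of_isIn name "topklasse".toList 0 (by simp [pvKwRanks]) (by decide) h
        · exact pv_le_of_isIn name "hoofdklasse".toList 0 (by simp [pvKwRanks]) (by decide) h
      rw [if_pos h1, Nat.le_zero.mp hle]
      rfl
    · rw [if_neg h1]
      rw [Bool.or_eq_true_iff, not_or, Bool.not_eq_true, Bool.not_eq_true] at h1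
      by_cases h2 : (PySem.Chars.isIn "eerste".toList name || PySem.Chars.isIn "tweede".toList name) = true
      · have hle : r ≤ 1 := by
          rcases Bool.or_eq_true_iff.mp h2 with h | h
          · exact pv_le_of_isIn name "eerste".toList 1 (by simp [pvKwRanks]) (by decide) h
          · exact pv_le_of_isIn name "tweede".toList 1 (by simp [pvKwRanks]) (by decide) h
        have hge : r = 1 := by
          rcases hattain with h | ⟨r', hval, hflag⟩
          · omega
          · rcases hflag with ⟨h0, hf⟩|⟨h0,_⟩|⟨h0,_⟩|⟨h0,_⟩|⟨h0,_⟩|⟨h0,_⟩ <;> subst h0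
            · rcases hf with hf | hf <;> rw [hf] at h1 <;> simp at h1
            all_goals omega
        rw [if_pos h2, hge]
        rfl
      · rw [if_neg h2]
        rw [Bool.or_eq_true_iff, not_or, Bool.not_eq_true, Bool.not_eq_true] at h2
        by_cases h3 : (PySem.Chars.isIn "derde".toList name || PySem.Chars.isIn "vierde".toList name) = true
        · have hle : r ≤ 2 := by
            rcases Bool.or_eq_true_iff.mp h3 with h | h
            · exact pv_le_of_isIn name "derde".toList 2 (by simp [pvKwRanks]) (by decide) h
            · exact pv_le_of_isIn name "vierde".toList 2 (by simp [pvKwRanks]) (by decide) h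
          have hge : r = 2 := by
            rcases hattain with h | ⟨r', hval, hflag⟩
            · omega
            · rcases hflag with ⟨h0,hf⟩|⟨h0,hf⟩|⟨h0,_⟩|⟨h0,_⟩|⟨h0,_⟩|⟨h0,_⟩ <;> subst h0
              · rcases hf with hf | hf <;> rw [hf] at h1 <;> simp at h1
              · rcases hf with hf | hf <;> rw [hf] at h2 <;> simp at h2
              all_goals omega
          rw [if_pos h3, hge]
          rfl
        · rw [if_neg h3]
          rw [Bool.or_eq_true_iff, not_or, Bool.not_eq_true, Bool.not_eq_true] at h3
          by_cases h4 : (PySem.Chars.isIn "zami".toList name || PySem.Chars.isIn "zomi".toList name) = true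
          · have hle : r ≤ 3 := by
              rcases Bool.or_eq_true_iff.mp h4 with h | h
              · exact pv_le_of_isIn name "zami".toList 3 (by simp [pvKwRanks]) (by decide) h
              · exact pv_le_of_isIn name "zomi".toList 3 (by simp [pvKwRanks]) (by decide) h
            have hge : r = 3 := by
              rcases hattain with h | ⟨r', hval, hflag⟩
              · omega
              · rcases hflag with ⟨h0,hf⟩|⟨h0,hf⟩|⟨h0,hf⟩|⟨h0,_⟩|⟨h0,_⟩|⟨h0,_⟩ <;> subst h0
                · rcases hf with hf | hf <;> rw [hf] at h1 <;> simp at h1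
                · rcases hf with hf | hf <;> rw [hf] at h2 <;> simp at h2
                · rcases hf with hf | hf <;> rw [hf] at h3 <;> simp at h3
                all_goals omega
            rw [if_pos h4, hge]
            rfl
          · rw [if_neg h4]
            rw [Bool.or_eq_true_iff, not_or, Bool.not_eq_true, Bool.not_eq_true] at h4
            by_cases h5 : (["u17", "u15", "u13", "u11", "jeugd"].any
                (fun x => PySem.Chars.isIn x.toList name)) = true
            · have hle : r ≤ 4 := by
                simp only [List.any_eq_true] at h5
                obtain ⟨x, hx, hin⟩ := h5
                simp only [List.mem_cons, List.not_mem_nil, or_false] at hx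
                rcases hx with h|h|h|h|h <;> subst h
                · exact pv_le_of_isIn name "u17".toList 4 (by simp [pvKwRanks]) (by decide) hin
                · exact pv_le_of_isIn name "u15".toList 4 (by simp [pvKwRanks]) (by decide) hin
                · exact pv_le_of_isIn name "u13".toList 4 (by simp [pvKwRanks]) (by decide) hin
                · exact pv_le_of_isIn name "u11".toList 4 (by simp [pvKwRanks]) (by decide) hin
                · exact pv_le_of_isIn name "jeugd".toList 4 (by simp [pvKwRanks]) (by decide) hin
              have hge : r = 4 := by
                rcases hattain with h | ⟨r', hval, hflag⟩
                · omega
                · rcases hflag with ⟨h0,hf⟩|⟨h0,hf⟩|⟨h0,hf⟩|⟨h0,hf⟩|⟨h0,_⟩|⟨h0,_⟩ <;> subst h0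
                  · rcases hf with hf | hf <;> rw [hf] at h1 <;> simp at h1
                  · rcases hf with hf | hf <;> rw [hf] at h2 <;> simp at h2
                  · rcases hf with hf | hf <;> rw [hf] at h3 <;> simp at h3
                  · rcases hf with hf | hf <;> rw [hf] at h4 <;> simp at h4
                  all_goals omega
              rw [if_pos h5, hge]
              rfl
            · rw [if_neg h5]
              have h5' : ∀ x ∈ (["u17", "u15", "u13", "u11", "jeugd"] : List String),
                  PySem.Chars.isIn x.toList name = false := by
                intro x hx
                rcases Bool.eq_false_or_eq_true (PySem.Chars.isIn x.toList name) with h | h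
                · exact absurd (List.any_eq_true.mpr ⟨x, hx, h⟩) h5
                · exact h
              by_cases h6 : (PySem.Chars.isIn "vrouwen".toList name || PySem.Chars.isIn "dames".toList name) = true
              · have hle : r ≤ 5 := by
                  rcases Bool.or_eq_true_iff.mp h6 with h | h
                  · exact pv_le_of_isIn name "vrouwen".toList 5 (by simp [pvKwRanks]) (by decide) h
                  · exact pv_le_of_isIn name "dames".toList 5 (by simp [pvKwRanks]) (by decide) h
                have hge : r = 5 := by
                  rcases hattain with h | ⟨r', hval, hflag⟩
                  · omega
                  · rcases hflag with ⟨h0,hf⟩|⟨h0,hf⟩|⟨h0,hf⟩|⟨h0,hf⟩|⟨h0,hf⟩|⟨h0,_⟩ <;> subst h0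
                    · rcases hf with hf | hf <;> rw [hf] at h1 <;> simp at h1
                    · rcases hf with hf | hf <;> rw [hf] at h2 <;> simp at h2
                    · rcases hf with hf | hf <;> rw [hf] at h3 <;> simp at h3
                    · rcases hf with hf | hf <;> rw [hf] at h4 <;> simp at h4
                    · rcases hf with hf|hf|hf|hf|hf <;>
                        [rw [h5' "u17" (by simp)] at hf; rw [h5' "u15" (by simp)] at hf;
                         rw [h5' "u13" (by simp)] at hf; rw [h5' "u11" (by simp)] at hf;
                         rw [h5' "jeugd" (by simp)] at hf] <;> exact absurd hf (by simp)
                    all_goals omega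
                rw [if_pos h6, hge]
                rfl
              · rw [if_neg h6]
                rw [Bool.or_eq_true_iff, not_or, Bool.not_eq_true, Bool.not_eq_true] at h6
                have hge : r = 6 := by
                  rcases hattain with h | ⟨r', hval, hflag⟩
                  · exact h
                  · rcases hflag with ⟨h0,hf⟩|⟨h0,hf⟩|⟨h0,hf⟩|⟨h0,hf⟩|⟨h0,hf⟩|⟨h0,hf⟩ <;> subst h0
                    · rcases hf with hf | hf <;> rw [hf] at h1 <;> simp at h1
                    · rcases hf with hf | hf <;> rw [hf] at h2 <;> simp at h2
                    · rcases hf with hf | hf <;> rw [hf] at h3 <;> simp at h3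
                    · rcases hf with hf | hf <;> rw [hf] at h4 <;> simp at h4
                    · rcases hf with hf|hf|hf|hf|hf <;>
                        [rw [h5' "u17" (by simp)] at hf; rw [h5' "u15" (by simp)] at hf;
                         rw [h5' "u13" (by simp)] at hf; rw [h5' "u11" (by simp)] at hf;
                         rw [h5' "jeugd" (by simp)] at hf] <;> exact absurd hf (by simp)
                    · rcases hf with hf | hf <;> rw [hf] at h6 <;> simp at h6
                rw [hge]
                rfl
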